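-- pv_equiv track=rewrite | github.com/ravali156/opensource | Vesa_prep/ram's_absence_streak.py | find_max_consecutive_absent_days
-- ===== SOURCE A (Python) =====
-- def find_max_consecutive_absent_days(N, attendance_record):
--     max_absent = 0
--     current_absent = 0
--     for day in attendance_record:
--         if day == '0':
--             current_absent += 1
--         else:
--             max_absent = max(max_absent, current_absent)
--             current_absent = 0
--     max_absent = max(max_absent, current_absent)
--     return max_absent
-- ===== SOURCE B (Python) =====
-- def find_max_consecutive_absent_days(N, attendance_record):
--     # Run-based scan: find each maximal run of identical days, consider it
--     # only if it is a run of '0'; no running counter / reset logic.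
--     best = 0
--     i = 0
--     n = len(attendance_record)
--     while i < n:
--         j = i + 1
--         while j < n and attendance_record[j] == attendance_record[i]:
--             j += 1
--         if attendance_record[i] == '0' and j - i > best:
--             best = j - i
--         i = j
--     return best
-- ===== Notes on version B (the rewrite author's own statement) =====
-- stated objective: alternative
-- what changed: B scans maximal runs of identical elements (two-level span-style scan) and keeps the longest '0' run, instead of A's single pass with a running counter and reset-on-nonzero logic.
import Mathlib
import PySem

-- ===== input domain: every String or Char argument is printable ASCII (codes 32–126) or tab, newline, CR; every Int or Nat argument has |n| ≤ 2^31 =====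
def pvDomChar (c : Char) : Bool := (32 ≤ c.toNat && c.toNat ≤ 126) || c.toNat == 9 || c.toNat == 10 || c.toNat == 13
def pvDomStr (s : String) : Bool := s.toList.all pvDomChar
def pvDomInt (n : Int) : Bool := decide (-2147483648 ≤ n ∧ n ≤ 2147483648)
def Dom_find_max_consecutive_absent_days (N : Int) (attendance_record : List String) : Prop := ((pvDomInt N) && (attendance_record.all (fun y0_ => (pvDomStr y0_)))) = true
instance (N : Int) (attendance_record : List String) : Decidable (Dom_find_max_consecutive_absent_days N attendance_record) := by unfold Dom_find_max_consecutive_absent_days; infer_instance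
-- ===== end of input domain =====

-- B replaces A's running counter + reset-on-nonzero scan by a run-based scan
-- (maximal runs of identical elements, keep the longest run of "0"): alternative
-- decomposition, same O(n) cost.

-- ===== PORT A =====
-- literal port of A's loop: state (max_absent, current_absent), final max outside the loop
def find_max_consecutive_absent_days (N : Int) (attendance_record : List String) : Int :=
  let s := attendance_record.foldl
    (fun (s : Int × Int) day => if day == "0" then (s.1, s.2 + 1) else (max s.1 s.2, 0))
    (0, 0)
  max s.1 s.2

-- ===== PORT B =====
-- port of Source B's outer while loop: the inner while that extends a run of
-- attendance_record[i] is takeWhile/dropWhile on the tail (exact: same scan order)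
def pvRunMax : List String → Int → Int
  | [], best => best
  | x :: xs, best =>
    let run := xs.takeWhile (· == x)
    let rest := xs.dropWhile (· == x)
    let len : Int := (run.length : Int) + 1
    pvRunMax rest (if x == "0" && decide (len > best) then len else best)
termination_by l _ => l.length
decreasing_by
  simpa using Nat.lt_succ_of_le (List.length_dropWhile_le (· == x) xs)

def find_max_consecutive_absent_days_alt (N : Int) (attendance_record : List String) : Int :=
  pvRunMax attendance_record 0

-- ===== PRECONDITION & SPEC =====
def Spec_find_max_consecutive_absent_days (N : Int) (attendance_record : List String) (out : Int) : Prop := out = find_max_consecutive_absent_days_alt N attendance_record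
instance (N : Int) (attendance_record : List String) (out : Int) : Decidable (Spec_find_max_consecutive_absent_days N attendance_record out) := by unfold Spec_find_max_consecutive_absent_days; infer_instance

-- ===== CLAIM (what is proved, stated in full; the proofs are below) =====
def Claim_equal_find_max_consecutive_absent_days : Prop := ∀ (N : Int) (attendance_record : List String), Dom_find_max_consecutive_absent_days N attendance_record → Spec_find_max_consecutive_absent_days N attendance_record (find_max_consecutive_absent_days N attendance_record)

-- ===== LEMMAS AND PROOFS =====

-- proof-only characterisation of A's loop: value of the scan continuing a current run of length c
def pvCont : Int → List String → Int
  | c, [] => c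
  | c, x :: xs => if x == "0" then pvCont (c + 1) xs else max c (pvCont 0 xs)

theorem pvCont_nonneg : ∀ (l : List String) (c : Int), c ≤ pvCont c l := by
  intro l
  induction l with
  | nil => intro c; simp [pvCont]
  | cons x xs ih =>
    intro c
    simp only [pvCont]
    split
    · exact le_trans (by omega) (ih (c + 1))
    · exact le_max_left _ _

theorem foldl_eq_pvCont : ∀ (l : List String) (m c : Int),
    (let s := l.foldl
        (fun (s : Int × Int) day => if day == "0" then (s.1, s.2 + 1) else (max s.1 s.2, 0)) (m, c)
     max s.1 s.2) = max m (pvCont c l) := by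
  intro l
  induction l with
  | nil => intro m c; simp [pvCont]
  | cons x xs ih =>
    intro m c
    simp only [List.foldl_cons, pvCont]
    split
    · exact ih m (c + 1)
    · rw [ih (max m c) 0]
      omega

theorem pvCont_zeros : ∀ (run : List String) (c : Int) (t : List String),
    (∀ a ∈ run, a = "0") → pvCont c (run ++ t) = pvCont (c + run.length) t := by
  intro run
  induction run with
  | nil => intro c t _; simp
  | cons y run' ih =>
    intro c t h
    have hy : y = "0" := h y (by simp)
    simp only [List.cons_append, pvCont, hy]
    simp only [beq_self_eq_true, if_true]
    rw [ih (c + 1) t (fun a ha => h a (by simp [ha]))]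
    congr 1
    simp only [List.length_cons]
    push_cast
    omega

theorem pvCont_nonzeros : ∀ (run : List String) (c : Int) (t : List String),
    run ≠ [] → (∀ a ∈ run, (a == "0") = false) → pvCont c (run ++ t) = max c (pvCont 0 t) := by
  intro run
  induction run with
  | nil => intro _ _ h; exact absurd rfl h
  | cons y run' ih =>
    intro c t _ h
    have hy : (y == "0") = false := h y (by simp)
    simp only [List.cons_append, pvCont, hy, Bool.false_eq_true, if_false]
    cases run' with
    | nil => simp
    | cons z run'' =>
      rw [ih 0 t (by simp) (fun a ha => h a (by simp [ha]))]
      have := pvCont_nonneg t 0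
      omega

-- accumulation: B's running best just takes max with the pure run maximum
theorem pvRunMax_acc : ∀ (l : List String) (b : Int) (best : Int), 0 ≤ best →
    pvRunMax l best = max best (pvRunMax l 0) := by
  intro l b
  induction l, b using pvRunMax.induct with
  | case1 b0 => intro best h; simp only [pvRunMax]; omega
  | case2 x xs best' run rest len ih =>
    intro best h
    simp only [pvRunMax]
    by_cases hx : (x == "0") = true
    · have hlen : (1 : Int) ≤ len := by simp [len]
      have h1 : (if x == "0" && decide (len > best) then len else best) = max best len := by
        simp [hx]; omega
      have h2 : (if x == "0" && decide (len > 0) then len else 0) = len := by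
        simp [hx]; omega
      rw [h1, h2, ih (max best len) (by omega), ih len (by omega)]
      omega
    · have hx' : (x == "0") = false := by simpa using hx
      simp only [hx', Bool.false_and, Bool.false_eq_true, if_false]
      exact ih best h

theorem head_dropWhile_false {p : String → Bool} :
    ∀ (l : List String) (y : String) (ys : List String),
      l.dropWhile p = y :: ys → p y = false := by
  intro l
  induction l with
  | nil => intro y ys h; simp at h
  | cons a l ih =>
    intro y ys h
    rw [List.dropWhile_cons] at h
    by_cases hp : p a
    · rw [if_pos hp] at h; exact ih y ys h
    · rw [if_neg hp] at h
      cases h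
      simpa using hp

theorem pvCont_eq_pvRunMax : ∀ (l : List String) (_b : Int), pvCont 0 l = pvRunMax l 0 := by
  intro l _b
  induction l, _b using pvRunMax.induct with
  | case1 best => simp [pvCont, pvRunMax]
  | case2 x xs best run rest len ih =>
    have hsplit : x :: xs = (x :: xs.takeWhile (· == x)) ++ xs.dropWhile (· == x) := by
      simp [List.takeWhile_append_dropWhile]
    by_cases hx : (x == "0") = true
    · have hx' : x = "0" := by simpa using hx
      have hz : ∀ a ∈ x :: xs.takeWhile (· == x), a = "0" := by
        intro a ha
        rcases List.mem_cons.mp ha with h | h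
        · rw [h, hx']
        · have := List.mem_takeWhile_imp h
          simp at this
          rw [this, hx']
      have k0 : pvCont 0 (x :: xs) =
          pvCont (0 + ((x :: xs.takeWhile (· == x)).length : Int)) (xs.dropWhile (· == x)) := by
        conv_lhs => rw [hsplit]
        exact pvCont_zeros _ 0 _ hz
      have hk : (0 : Int) + ((x :: xs.takeWhile (· == x)).length : Int) =
          ((xs.takeWhile (· == x)).length : Int) + 1 := by
        push_cast [List.length_cons]; ring
      rw [hk] at k0
      set k : Int := ((xs.takeWhile (· == x)).length : Int) + 1 with hkdef
      have hk1 : (1 : Int) ≤ k := by rw [hkdef]; omega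
      -- pvCont k rest = max k (pvCont 0 rest) since rest is [] or starts with non-"0"
      have hrest : pvCont k (xs.dropWhile (· == x)) =
          max k (pvCont 0 (xs.dropWhile (· == x))) := by
        cases hr : xs.dropWhile (· == x) with
        | nil => simp [pvCont]; omega
        | cons y ys =>
          have hy : (y == x) = false := head_dropWhile_false xs y ys hr
          have hy0 : (y == "0") = false := by
            rw [hx'] at hy; exact hy
          simp [pvCont, hy0]
          have := pvCont_nonneg ys 0
          omega
      have hB : pvRunMax (x :: xs) 0 = max k (pvRunMax (xs.dropWhile (· == x)) 0) := by
        simp only [pvRunMax]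
        have : (if x == "0" && decide (((xs.takeWhile (· == x)).length : Int) + 1 > 0)
            then ((xs.takeWhile (· == x)).length : Int) + 1 else 0) = k := by
          simp [hx, hkdef]
        rw [this]
        exact pvRunMax_acc _ 0 k (by omega)
      have ih' : pvCont 0 (xs.dropWhile (· == x)) = pvRunMax (xs.dropWhile (· == x)) 0 := ih
      rw [k0, hrest, hB, ih']
    · have hx' : (x == "0") = false := by simpa using hx
      have hnz : ∀ a ∈ x :: xs.takeWhile (· == x), (a == "0") = false := by
        intro a ha
        rcases List.mem_cons.mp ha with h | h
        · rw [h]; exact hx'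
        · have := List.mem_takeWhile_imp h
          simp at this
          rw [this]; exact hx'
      have k0 : pvCont 0 (x :: xs) = max 0 (pvCont 0 (xs.dropWhile (· == x))) := by
        conv_lhs => rw [hsplit]
        exact pvCont_nonzeros _ 0 _ (by simp) hnz
      have hB : pvRunMax (x :: xs) 0 = pvRunMax (xs.dropWhile (· == x)) 0 := by
        simp only [pvRunMax, hx', Bool.false_and, Bool.false_eq_true, if_false]
      have ih' : pvCont 0 (xs.dropWhile (· == x)) = pvRunMax (xs.dropWhile (· == x)) 0 := ih
      rw [k0, hB, ← ih']
      have := pvCont_nonneg (xs.dropWhile (· == x)) 0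
      omega

-- ===== VERDICT (by name: the statement is the Claim_ definition above) =====
theorem find_max_consecutive_absent_days_spec : Claim_equal_find_max_consecutive_absent_days := by
  intro N l _
  show find_max_consecutive_absent_days N l = find_max_consecutive_absent_days_alt N l
  unfold find_max_consecutive_absent_days find_max_consecutive_absent_days_alt
  rw [foldl_eq_pvCont l 0 0, ← pvCont_eq_pvRunMax l 0]
  have := pvCont_nonneg l 0
  omega
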